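-- pv_equiv track=rewrite | github.com/Zacatac23/Laboratorios-de-TM | lab8.py | ejercicio2
-- ===== SOURCE A (Python) =====
-- def ejercicio2(n: int) -> int:
--     """
--     Complejidad esperada: O(n)
--     El break en el loop interno hace que solo se ejecute 1 vez por iteración externa
--     """
--     if n <= 1:
--         return 0
--
--     counter = 0
--     for i in range(1, n + 1):
--         for j in range(1, n + 1):
--             counter += 1
--             break  # Solo ejecuta una vez
--     return counter
-- ===== SOURCE B (Python) =====
-- def ejercicio2(n: int) -> int:
--     # Closed form: the inner loop breaks immediately, so the count is one
--     # per outer iteration, i.e. n whenever n > 1, else 0.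
--     return n if n > 1 else 0
-- ===== Notes on version B (the rewrite author's own statement) =====
-- stated objective: simpler
-- what changed: Replaced the doubly-nested counting loop (whose inner loop always breaks after one increment) with the closed-form expression n if n > 1 else 0.
import Mathlib
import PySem

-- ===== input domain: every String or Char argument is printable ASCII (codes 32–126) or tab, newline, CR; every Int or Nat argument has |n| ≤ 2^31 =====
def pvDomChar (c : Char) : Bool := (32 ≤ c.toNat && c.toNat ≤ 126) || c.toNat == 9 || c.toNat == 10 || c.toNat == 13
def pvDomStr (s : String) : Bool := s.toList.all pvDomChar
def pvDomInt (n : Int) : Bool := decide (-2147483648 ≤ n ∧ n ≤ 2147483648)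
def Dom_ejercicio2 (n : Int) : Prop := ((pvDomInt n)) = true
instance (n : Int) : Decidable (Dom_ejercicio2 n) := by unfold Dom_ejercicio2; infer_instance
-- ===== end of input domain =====

-- ===== PORT A =====
-- B replaces A's nested loop (inner break) with the closed form n if n > 1 else 0.
def ejercicio2 (n : Int) : Int :=
  if n ≤ 1 then 0
  else
    (PySem.List.pyRange 1 (n+1) 1).foldl
      (fun counter _i =>
        -- inner: for j in range(1, n+1): counter += 1; break
        match PySem.List.pyRange 1 (n+1) 1 with
        | [] => counter
        | _ :: _ => counter + 1) 0

-- ===== PORT B =====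
def ejercicio2_alt (n : Int) : Int :=
  if n > 1 then n else 0

-- ===== PRECONDITION & SPEC =====
def Spec_ejercicio2 (n : Int) (out : Int) : Prop := out = ejercicio2_alt n
instance (n : Int) (out : Int) : Decidable (Spec_ejercicio2 n out) := by unfold Spec_ejercicio2; infer_instance

-- ===== CLAIM (what is proved, stated in full; the proofs are below) =====
def Claim_equal_ejercicio2 : Prop := ∀ (n : Int), Dom_ejercicio2 n → Spec_ejercicio2 n (ejercicio2 n)

-- ===== LEMMAS AND PROOFS =====

-- ===== VERDICT (by name: the statement is the Claim_ definition above) =====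
theorem pv_fold_const {f : Int → Int → Int} (l : List Int) (init : Int)
    (hf : ∀ c i, f c i = c + 1) :
    l.foldl f init = init + l.length := by
  induction l generalizing init with
  | nil => simp
  | cons x xs ih =>
    rw [List.foldl_cons, hf, ih]
    simp only [List.length_cons]; push_cast; ring

theorem ejercicio2_spec : Claim_equal_ejercicio2 := by
  intro n _
  unfold Spec_ejercicio2 ejercicio2 ejercicio2_alt
  by_cases h : n ≤ 1
  · simp [h, show ¬ n > 1 by omega]
  · have hne : PySem.List.pyRange 1 (n+1) 1 ≠ [] := by
      rw [PySem.List.pyRange_one_cons (by omega)]; simp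
    have hstep : ∀ (c i : Int),
        (fun counter _i =>
          (match PySem.List.pyRange 1 (n+1) 1 with
           | [] => counter
           | _ :: _ => counter + 1) : Int → Int → Int) c i = c + 1 := by
      intro c i
      cases hr : PySem.List.pyRange 1 (n+1) 1 with
      | nil => exact absurd hr hne
      | cons a l => simp
    rw [if_neg h, pv_fold_const _ _ hstep, PySem.List.length_pyRange_one,
        if_pos (by omega : n > 1)]
    omega
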